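-- pv_equiv track=rewrite | github.com/seanbbear/PatternRecognition_Assignment | hw1/wine_classfier.py | splitClass
-- ===== SOURCE A (Python) =====
-- def splitClass(feature,target):
--     class1 = []
--     class2 = []
--     class3 = []
--     for i in range(len(target)):
--         if target[i] == 1:
--             class1.append(feature[i])
--         elif target[i] ==2:
--             class2.append(feature[i])
--         else:
--             class3.append(feature[i])
--     return class1,class2,class3
-- ===== SOURCE B (Python) =====
-- def splitClass(feature, target):
--     pairs = list(zip(feature, target))
--     class1 = [f for f, t in pairs if t == 1]
--     class2 = [f for f, t in pairs if t == 2]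
--     class3 = [f for f, t in pairs if t != 1 and t != 2]
--     return class1, class2, class3
-- ===== Notes on version B (the rewrite author's own statement) =====
-- stated objective: alternative
-- what changed: Replaced the single index-driven loop with if/elif/else branching into three accumulators by zipping feature with target once and building each class as its own filtered comprehension over the pairs (three independent filtered scans, no indexing).
import Mathlib
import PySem

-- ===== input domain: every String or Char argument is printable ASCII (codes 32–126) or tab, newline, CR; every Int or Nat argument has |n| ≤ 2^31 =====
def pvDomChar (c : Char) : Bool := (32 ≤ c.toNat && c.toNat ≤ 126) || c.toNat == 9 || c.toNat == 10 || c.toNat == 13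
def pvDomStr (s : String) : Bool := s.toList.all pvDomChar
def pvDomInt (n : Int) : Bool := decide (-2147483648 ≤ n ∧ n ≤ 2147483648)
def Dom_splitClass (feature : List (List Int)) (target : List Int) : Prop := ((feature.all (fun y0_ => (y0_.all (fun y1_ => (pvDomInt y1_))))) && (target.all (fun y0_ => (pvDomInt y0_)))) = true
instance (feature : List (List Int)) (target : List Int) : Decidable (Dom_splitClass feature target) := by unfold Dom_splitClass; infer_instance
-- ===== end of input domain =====

-- B replaces A's single index-driven if/elif/else loop by one zip and three independent filtered scans (alternative decomposition, same cost).


-- ===== PORT A =====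
-- for i in range(len(target)): branch on target[i], append feature[i] to one of three accumulators
def splitClass (feature : List (List Int)) (target : List Int) : List (List Int) × List (List Int) × List (List Int) :=
  (PySem.List.pyRange 0 target.length 1).foldl
    (fun (acc : List (List Int) × List (List Int) × List (List Int)) i =>
      -- pyGetD is exact here: Pre_ guarantees every index is in range for both lists
      let t := PySem.List.pyGetD target i 0
      let f := PySem.List.pyGetD feature i []
      if t = 1 then (acc.1 ++ [f], acc.2.1, acc.2.2)
      else if t = 2 then (acc.1, acc.2.1 ++ [f], acc.2.2)
      else (acc.1, acc.2.1, acc.2.2 ++ [f]))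
    ([], [], [])

-- ===== PORT B =====
def splitClass_alt (feature : List (List Int)) (target : List Int) : List (List Int) × List (List Int) × List (List Int) :=
  let pairs := feature.zip target
  ((pairs.filter (fun p => p.2 == 1)).map Prod.fst,
   (pairs.filter (fun p => p.2 == 2)).map Prod.fst,
   (pairs.filter (fun p => p.2 != 1 && p.2 != 2)).map Prod.fst)

-- ===== PRECONDITION & SPEC =====
-- A raises IndexError at feature[i] when target is longer than feature; exactly those inputs are excluded.
def Pre_splitClass (feature : List (List Int)) (target : List Int) : Prop := target.length ≤ feature.length
instance (feature : List (List Int)) (target : List Int) : Decidable (Pre_splitClass feature target) := by unfold Pre_splitClass; infer_instance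
def pvWitness_splitClass : List (List Int) × List Int := ([[1, 2], [3], [4]], [1, 2, 3])


def Spec_splitClass (feature : List (List Int)) (target : List Int) (out : List (List Int) × List (List Int) × List (List Int)) : Prop := out = splitClass_alt feature target
instance (feature : List (List Int)) (target : List Int) (out : List (List Int) × List (List Int) × List (List Int)) : Decidable (Spec_splitClass feature target out) := by unfold Spec_splitClass; infer_instance

-- ===== CLAIM (what is proved, stated in full; the proofs are below) =====
def Claim_equal_splitClass : Prop := ∀ (feature : List (List Int)) (target : List Int), Dom_splitClass feature target → Pre_splitClass feature target → Spec_splitClass feature target (splitClass feature target)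

-- ===== LEMMAS AND PROOFS =====

-- under Pre_, the list of (feature[i], target[i]) pairs read by A's index loop IS feature.zip target
lemma map_pyGetD_pair_eq_zip (feature : List (List Int)) (target : List Int)
    (h : target.length ≤ feature.length) :
    (PySem.List.pyRange 0 target.length 1).map
      (fun i => (PySem.List.pyGetD feature i ([] : List Int), PySem.List.pyGetD target i 0))
    = feature.zip target := by
  apply List.ext_getElem
  · simp [PySem.List.length_pyRange_one, List.length_zip]
    omega
  · intro k h1 h2
    have hk : k < target.length := by
      simpa [PySem.List.length_pyRange_one] using h1
    simp only [List.getElem_map, PySem.List.getElem_pyRange_one, List.getElem_zip, zero_add]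
    rw [PySem.List.pyGetD_natCast, PySem.List.pyGetD_natCast]
    rw [List.getD_eq_getElem _ _ hk, List.getD_eq_getElem _ _ (lt_of_lt_of_le hk h)]

-- folding A's branch body over any pair list appends the three filtered projections
lemma foldl_branch_eq_filters (pairs : List (List Int × Int))
    (c1 c2 c3 : List (List Int)) :
    pairs.foldl
      (fun (acc : List (List Int) × List (List Int) × List (List Int)) p =>
        if p.2 = 1 then (acc.1 ++ [p.1], acc.2.1, acc.2.2)
        else if p.2 = 2 then (acc.1, acc.2.1 ++ [p.1], acc.2.2)
        else (acc.1, acc.2.1, acc.2.2 ++ [p.1]))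
      (c1, c2, c3)
    = (c1 ++ (pairs.filter (fun p => p.2 == 1)).map Prod.fst,
       c2 ++ (pairs.filter (fun p => p.2 == 2)).map Prod.fst,
       c3 ++ (pairs.filter (fun p => p.2 != 1 && p.2 != 2)).map Prod.fst) := by
  induction pairs generalizing c1 c2 c3 with
  | nil => simp
  | cons p ps ih =>
    by_cases h1 : p.2 = 1
    · simp [List.foldl_cons, h1, ih]
    · by_cases h2 : p.2 = 2
      · simp [List.foldl_cons, h1, h2, ih]
      · simp [List.foldl_cons, h1, h2, ih]

-- ===== VERDICT (by name: the statement is the Claim_ definition above) =====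
theorem splitClass_spec : Claim_equal_splitClass := by
  intro feature target _ hpre
  unfold Spec_splitClass splitClass splitClass_alt
  have hz := foldl_branch_eq_filters (feature.zip target) [] [] []
  simp only [List.nil_append] at hz
  rw [← hz, ← map_pyGetD_pair_eq_zip feature target hpre, List.foldl_map]
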